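-- pv_equiv track=rewrite | github.com/lulunkaii/NonogramaPP | mecanicas.py | __calcular_secuencias__
-- ===== SOURCE A (Python) =====
-- def __calcular_secuencias__(linea):
--     """
--     Calcula las secuencias de una linea.
--
--     Args:
--         linea (List(Celda)): La linea de la matriz objetivo
--     Returns:
--         int: El numero de secuencias en la linea.
--     """
--     secuencias = 0
--     valor_anterior = -1
--     enSecuencia = False
--     for valor in linea:
--         if valor != 0 and (not enSecuencia or valor_anterior!=valor):
--             secuencias += 1
--             enSecuencia = True
--         elif valor == 0:
--             enSecuencia = False
--         valor_anterior=valor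
--     return secuencias
-- ===== SOURCE B (Python) =====
-- def __calcular_secuencias__(linea):
--     """Two-stage (groupby-style): first compress the line into its list of
--     run keys (one entry per maximal run of consecutive equal values), then
--     count the run keys that are nonzero."""
--     runs = []
--     for v in linea:
--         if not runs or runs[-1] != v:
--             runs.append(v)
--     return sum(1 for k in runs if k != 0)
-- ===== Notes on version B (the rewrite author's own statement) =====
-- stated objective: idiomatic
-- what changed: Replaces the mutable flag/previous-value state machine with a staged groupby-style decomposition: first build the explicit list of run keys (one per maximal run of equal values), then count the nonzero keys.
import Mathlib
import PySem

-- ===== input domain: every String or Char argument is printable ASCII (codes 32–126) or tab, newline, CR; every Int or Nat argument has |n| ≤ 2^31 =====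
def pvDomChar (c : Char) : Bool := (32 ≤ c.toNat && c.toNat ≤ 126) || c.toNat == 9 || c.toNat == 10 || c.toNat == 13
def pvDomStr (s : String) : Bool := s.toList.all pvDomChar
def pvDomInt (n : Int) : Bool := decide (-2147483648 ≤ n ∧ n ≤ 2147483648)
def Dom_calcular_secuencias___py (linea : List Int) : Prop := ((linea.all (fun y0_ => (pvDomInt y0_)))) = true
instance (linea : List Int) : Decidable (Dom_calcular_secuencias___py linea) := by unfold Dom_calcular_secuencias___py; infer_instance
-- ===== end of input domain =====

-- B replaces A's flag/previous-value state machine by a staged decomposition: build the run-key list, then count nonzero keys (same cost, no proved speed claim).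

-- ===== PORT A =====
-- literal transliteration of A's loop: state (secuencias, valor_anterior, enSecuencia)
def calcular_secuencias___py (linea : List Int) : Int :=
  (linea.foldl (fun (st : Int × Int × Bool) valor =>
    if valor ≠ 0 ∧ (st.2.2 = false ∨ st.2.1 ≠ valor) then (st.1 + 1, valor, true)
    else if valor = 0 then (st.1, valor, false)
    else (st.1, valor, st.2.2)) (0, -1, false)).1

-- ===== PORT B =====
-- stage 1 of Source B: the runs list (append v when runs is empty or its last entry differs)
def pvRuns (linea : List Int) : List Int :=
  linea.foldl (fun (runs : List Int) v =>
    if runs = [] ∨ runs.getLast? ≠ some v then runs ++ [v] else runs) []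

-- stage 2 of Source B: count the nonzero run keys
def calcular_secuencias___py_alt (linea : List Int) : Int :=
  Int.ofNat ((pvRuns linea).countP (fun k => k != 0))

-- ===== PRECONDITION & SPEC =====
def Spec_calcular_secuencias___py (linea : List Int) (out : Int) : Prop := out = calcular_secuencias___py_alt linea
instance (linea : List Int) (out : Int) : Decidable (Spec_calcular_secuencias___py linea out) := by unfold Spec_calcular_secuencias___py; infer_instance

-- ===== CLAIM (what is proved, stated in full; the proofs are below) =====
def Claim_equal_calcular_secuencias___py : Prop := ∀ (linea : List Int), Dom_calcular_secuencias___py linea → Spec_calcular_secuencias___py linea (calcular_secuencias___py linea)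

-- ===== LEMMAS AND PROOFS =====

-- proof-only helper: run keys of xs after a (possibly absent) previous key p
def pvGK (p : Option Int) : List Int → List Int
  | [] => []
  | x :: xs => if some x = p then pvGK p xs else x :: pvGK (some x) xs

-- B's fold appends exactly the run keys after the accumulator's last entry
theorem pvRuns_eq (xs : List Int) : ∀ (runs : List Int),
    xs.foldl (fun (runs : List Int) v =>
      if runs = [] ∨ runs.getLast? ≠ some v then runs ++ [v] else runs) runs
    = runs ++ pvGK runs.getLast? xs := by
  induction xs with
  | nil => intro runs; simp [pvGK]
  | cons x xs ih =>
    intro runs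
    by_cases h : runs = [] ∨ runs.getLast? ≠ some x
    · have hne : some x ≠ runs.getLast? := by
        rcases h with h | h
        · simp [h]
        · exact fun e => h (Eq.symm e)
      simp only [List.foldl_cons, if_pos h, ih, pvGK, if_neg hne,
        List.getLast?_append, List.getLast?_singleton]
      simp
    · have h2 : runs.getLast? = some x := by
        by_contra hne
        exact h (Or.inr hne)
      rw [List.foldl_cons, if_neg h, ih, h2]
      simp [pvGK]

-- loop invariant: A's fold from any state agrees with the nonzero count of the
-- run keys after a previous key p that decides "new run starts at y" the same way
theorem pv_loop_eq (xs : List Int) : ∀ (sec prev : Int) (enSec : Bool) (p : Option Int),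
    (∀ y : Int, y ≠ 0 → ((enSec = false ∨ prev ≠ y) ↔ p ≠ some y)) →
    (xs.foldl (fun (st : Int × Int × Bool) valor =>
        if valor ≠ 0 ∧ (st.2.2 = false ∨ st.2.1 ≠ valor) then (st.1 + 1, valor, true)
        else if valor = 0 then (st.1, valor, false)
        else (st.1, valor, st.2.2)) (sec, prev, enSec)).1
      = sec + Int.ofNat ((pvGK p xs).countP (fun k => k != 0)) := by
  induction xs with
  | nil => intro sec prev enSec p _; simp [pvGK]
  | cons x xs ih =>
    intro sec prev enSec p hR
    by_cases hx : x ≠ 0 ∧ (enSec = false ∨ prev ≠ x)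
    · have hp : p ≠ some x := (hR x hx.1).mp hx.2
      have := ih (sec + 1) x true (some x) (fun y _ => by simp)
      simp only [List.foldl_cons, if_pos hx, this, pvGK,
        if_neg (fun e => hp (Eq.symm e)), List.countP_cons]
      have hxb : (x != 0) = true := by simp [hx.1]
      simp only [hxb, if_pos rfl, Int.ofNat_eq_natCast]
      push_cast
      omega
    · by_cases hx0 : x = 0
      · subst hx0
        have := ih sec 0 false (some 0) (fun y hy => by simp [Ne.symm hy])
        simp only [List.foldl_cons, if_neg hx]
        by_cases hp0 : some (0:Int) = p
        · subst hp0
          simp only [pvGK, if_pos rfl] at *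
          simpa using this
        · simp only [pvGK, if_neg hp0, List.countP_cons]
          simpa using this
      · -- x ≠ 0, so enSec = true, prev = x, and p = some x
        have henSec : enSec = true := by
          cases enSec with
          | false => exact absurd ⟨hx0, Or.inl rfl⟩ hx
          | true => rfl
        have hprev : prev = x := by
          by_contra h; exact hx ⟨hx0, Or.inr h⟩
        have hp : p = some x := by
          by_contra h; exact hx ⟨hx0, (hR x hx0).mpr h⟩
        have := ih sec x enSec (some x) (fun y _ => by simp [henSec])
        simp only [List.foldl_cons, if_neg hx, if_neg hx0, this, hp]
        simp [pvGK]

-- ===== VERDICT (by name: the statement is the Claim_ definition above) =====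
theorem calcular_secuencias___py_spec : Claim_equal_calcular_secuencias___py := by
  intro linea _
  unfold Spec_calcular_secuencias___py calcular_secuencias___py calcular_secuencias___py_alt pvRuns
  rw [pvRuns_eq linea []]
  have := pv_loop_eq linea 0 (-1) false none (fun y hy => by simp)
  simp [this]
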